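-- pv_equiv track=rewrite | github.com/EwetoyeIbrahim/MathSend | app/mathsend_engine/human_math/engine.py | convert
-- ===== SOURCE A (Python) =====
-- def convert(inp):
--     """
--     Since human readable expressions ofen combine numeric with alphabet
--     when they are meant to be multiplied, Thus,
--     all equations must be re-written to place * between then.
--     For example: 5x+8sin(x) means 5*x+8*sin(x)
--     """
--     # Is there "=" in the expresion?"
--     if len(inp) == 0:
--         return inp
--
--     # Rewrite the expression from scratch
--     tmp = [inp[0]]
--     for i in range(1, len(inp)):
--         # '*' should only be written if a digit and alphabet are next to each other
--         if (inp[i].isalpha() and inp[i - 1].isdigit()) or (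
--             inp[i].isdigit() and inp[i - 1].isalpha()):
--             tmp.append('*')
--         tmp.append(inp[i])
--     ans = ''.join(tmp)
--     return ans
-- ===== SOURCE B (Python) =====
-- def convert(inp):
--     """Tokenize into maximal same-class runs (digit / alpha / other), then glue
--     the runs back together, inserting '*' between a digit run and an alpha run."""
--     def cls(c):
--         if c.isdigit():
--             return 0
--         if c.isalpha():
--             return 1
--         return 2
--
--     def runs(s):
--         if not s:
--             return []
--         j = 1
--         while j < len(s) and cls(s[j]) == cls(s[0]):
--             j += 1
--         return [s[:j]] + runs(s[j:])
--
--     def glue(rs):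
--         if len(rs) < 2:
--             return ''.join(rs)
--         sep = '*' if cls(rs[0][-1]) + cls(rs[1][0]) == 1 else ''
--         return rs[0] + sep + glue(rs[1:])
--
--     return glue(runs(inp))
-- ===== Notes on version B (the rewrite author's own statement) =====
-- stated objective: alternative
-- what changed: Replaces A's single accumulator loop over character indices by a two-stage algorithm: recursively tokenize the string into maximal runs of one character class (digit/alpha/other), then glue the runs back together inserting a multiplication sign exactly between a digit run and an alpha run.
import Mathlib
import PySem

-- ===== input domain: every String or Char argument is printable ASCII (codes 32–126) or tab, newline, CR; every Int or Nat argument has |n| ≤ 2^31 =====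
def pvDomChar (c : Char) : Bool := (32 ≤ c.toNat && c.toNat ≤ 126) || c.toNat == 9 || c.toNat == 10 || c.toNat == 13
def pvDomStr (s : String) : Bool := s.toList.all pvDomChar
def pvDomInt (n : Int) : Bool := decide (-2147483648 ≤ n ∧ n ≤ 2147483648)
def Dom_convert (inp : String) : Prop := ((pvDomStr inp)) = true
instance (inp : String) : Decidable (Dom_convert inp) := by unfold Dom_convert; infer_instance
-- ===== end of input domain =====

-- B replaces A's single accumulator loop by a two-stage algorithm: tokenize the string
-- into maximal same-class runs (digit / alpha / other), then glue the runs back with a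
-- multiplication sign between a digit run and an alpha run (alternative decomposition, same cost).


-- ===== PORT A =====
-- literal port of A: guard on len == 0, then rebuild from scratch with an accumulator
-- over range(1, len(inp)), reading inp[i] / inp[i-1] (always in range under the loop
-- bounds, so pyGetD with a dummy default is exact).
def convert (inp : String) : String :=
  let cs := inp.toList
  if PySem.List.len cs = 0 then inp
  else
    let tmp :=
      (PySem.List.pyRange 1 (PySem.List.len cs)).foldl
        (fun tmp i =>
          let tmp :=
            if (PySem.Chars.isalpha (PySem.List.pyGetD cs i ' ') &&
                PySem.Chars.isdigit (PySem.List.pyGetD cs (i - 1) ' ')) ||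
               (PySem.Chars.isdigit (PySem.List.pyGetD cs i ' ') &&
                PySem.Chars.isalpha (PySem.List.pyGetD cs (i - 1) ' '))
            then tmp ++ ['*'] else tmp
          tmp ++ [PySem.List.pyGetD cs i ' '])
        [PySem.List.pyGetD cs 0 ' ']
    String.ofList tmp

-- ===== PORT B =====
-- Source B's cls(c): 0 = digit, 1 = alpha, 2 = other
def pvCls (c : Char) : Nat :=
  if PySem.Chars.isdigit c then 0 else if PySem.Chars.isalpha c then 1 else 2

-- Source B's runs(s): the while loop advancing j while cls(s[j]) == cls(s[0]) computes
-- exactly the longest same-class prefix of the tail, so s[:j] = head :: takeWhile,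
-- s[j:] = dropWhile (exact transcription of the loop's result).
def pvRuns : List Char → List (List Char)
  | [] => []
  | c :: rest =>
      (c :: rest.takeWhile (fun d => pvCls d == pvCls c)) ::
        pvRuns (rest.dropWhile (fun d => pvCls d == pvCls c))
  termination_by l => l.length
  decreasing_by
    simp only [List.length_cons]
    exact Nat.lt_succ_of_le (List.length_dropWhile_le _ _)

-- Source B's glue(rs): rs[0][-1] / rs[1][0] read via getLastD/headD (runs produced by
-- pvRuns are nonempty, so the default is never used on Source B's inputs).
def pvGlue : List (List Char) → List Char
  | [] => []
  | [r] => r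
  | r1 :: r2 :: rs =>
      r1 ++ (if pvCls (r1.getLastD ' ') + pvCls (r2.headD ' ') == 1 then ['*'] else [])
         ++ pvGlue (r2 :: rs)

def convert_alt (inp : String) : String :=
  String.ofList (pvGlue (pvRuns inp.toList))

-- ===== PRECONDITION & SPEC =====
def Spec_convert (inp : String) (out : String) : Prop := out = convert_alt inp
instance (inp : String) (out : String) : Decidable (Spec_convert inp out) := by unfold Spec_convert; infer_instance

-- ===== CLAIM (what is proved, stated in full; the proofs are below) =====
def Claim_equal_convert : Prop := ∀ (inp : String), Dom_convert inp → Spec_convert inp (convert inp)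

-- ===== LEMMAS AND PROOFS =====

-- the per-pair emission both sides reduce to: the tail of the output,
-- one piece per adjacent pair of the input
def pvBoundary (a b : Char) : Bool :=
  (PySem.Chars.isdigit a && PySem.Chars.isalpha b) ||
  (PySem.Chars.isalpha a && PySem.Chars.isdigit b)

def pvEmit (p : Char × Char) : List Char :=
  if pvBoundary p.1 p.2 then ['*', p.2] else [p.2]

-- A's branch condition (cur first) equals the boundary test (prev first).
theorem pvCond_eq (a b : Char) :
    ((PySem.Chars.isalpha b && PySem.Chars.isdigit a) ||
     (PySem.Chars.isdigit b && PySem.Chars.isalpha a)) = pvBoundary a b := by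
  unfold pvBoundary
  cases PySem.Chars.isalpha a <;> cases PySem.Chars.isdigit a <;>
    cases PySem.Chars.isalpha b <;> cases PySem.Chars.isdigit b <;> rfl

-- Python's isdigit and isalpha never both hold
theorem pvDisjoint (c : Char) :
    ¬ (PySem.Chars.isdigit c = true ∧ PySem.Chars.isalpha c = true) := by
  simp [PySem.Chars.isdigit, PySem.Chars.isalpha, PySem.Chars.isupper, PySem.Chars.islower]
  intro h1 h2
  exact ⟨fun hA => absurd (le_trans hA h2) (by decide),
         fun ha => absurd (le_trans ha h2) (by decide)⟩

-- pvBoundary is exactly Source B's "classes sum to 1" test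
theorem pvBoundary_eq_cls (a b : Char) :
    pvBoundary a b = (pvCls a + pvCls b == 1) := by
  have ha := pvDisjoint a
  have hb := pvDisjoint b
  unfold pvBoundary pvCls
  cases hda : PySem.Chars.isdigit a <;> cases haa : PySem.Chars.isalpha a <;>
    cases hdb : PySem.Chars.isdigit b <;> cases hab : PySem.Chars.isalpha b <;>
      simp_all

-- equal classes are never a boundary
theorem pvBoundary_same (a b : Char) (h : pvCls a = pvCls b) :
    pvBoundary a b = false := by
  rw [pvBoundary_eq_cls, h]
  have := pvDisjoint b
  unfold pvCls at *
  cases PySem.Chars.isdigit b <;> cases PySem.Chars.isalpha b <;> simp_all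

-- inside one same-class run the emitted tail is the run's tail (no stars)
theorem pvEmit_run (t : List Char) :
    ∀ c, (∀ d ∈ t, pvCls d = pvCls c) →
      ((c :: t).zip t).flatMap pvEmit = t := by
  induction t with
  | nil => intro c _; simp
  | cons d t' ih =>
    intro c h
    have hd : pvCls d = pvCls c := h d (by simp)
    have h' : ∀ e ∈ t', pvCls e = pvCls d := by
      intro e he; rw [h e (by simp [he]), hd]
    simp only [List.zip_cons_cons, List.flatMap_cons, ih d h']
    simp [pvEmit, pvBoundary_same c d hd.symm]

-- adjacent pairs of (c :: t ++ y :: ys) split at the run border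
theorem pvAdj_split (t : List Char) :
    ∀ c y ys, ((c :: (t ++ y :: ys)).zip (t ++ y :: ys))
      = ((c :: t).zip t) ++ ((c :: t).getLastD ' ', y) :: ((y :: ys).zip ys) := by
  induction t with
  | nil => intro c y ys; simp
  | cons d t' ih =>
    intro c y ys
    simp only [List.cons_append, List.zip_cons_cons, ih d y ys]
    simp

-- elements picked by takeWhile have the head's class
theorem pvTake_cls (rest : List Char) (c : Char) :
    ∀ d ∈ rest.takeWhile (fun d => pvCls d == pvCls c), pvCls d = pvCls c := by
  intro d hd
  simpa using List.mem_takeWhile_imp hd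

-- B's two stages compute head ++ per-pair emission
theorem pvGlue_runs (n : Nat) :
    ∀ (c : Char) (rest : List Char), rest.length ≤ n →
      pvGlue (pvRuns (c :: rest)) = c :: ((c :: rest).zip rest).flatMap pvEmit := by
  induction n with
  | zero =>
    intro c rest h
    have : rest = [] := List.eq_nil_of_length_eq_zero (Nat.le_zero.mp h)
    subst this
    simp [pvRuns, pvGlue]
  | succ n ih =>
    intro c rest h
    rw [pvRuns]
    have hsplit := List.takeWhile_append_dropWhile (p := fun d => pvCls d == pvCls c) (l := rest)
    set t := rest.takeWhile (fun d => pvCls d == pvCls c) with ht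
    set dr := rest.dropWhile (fun d => pvCls d == pvCls c) with hdr
    have hcls : ∀ d ∈ t, pvCls d = pvCls c := pvTake_cls rest c
    cases hd : dr with
    | nil =>
      have hrt : rest = t := by rw [← hsplit, hd, List.append_nil]
      simp only [pvRuns, pvGlue]
      rw [hrt, pvEmit_run t c hcls]
    | cons y ys =>
      have hrest : rest = t ++ y :: ys := by rw [← hsplit, hd]
      have hylen : ys.length ≤ n := by
        have h1 : dr.length ≤ rest.length := by
          rw [hdr]; exact List.length_dropWhile_le _ _
        rw [hd] at h1; simp at h1; omega
      have hglue : pvGlue ((c :: t) :: pvRuns (y :: ys)) =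
          (c :: t) ++ (if pvCls ((c :: t).getLastD ' ') + pvCls y == 1 then ['*'] else [])
            ++ pvGlue (pvRuns (y :: ys)) := by
        rw [pvRuns]
        simp [pvGlue]
      rw [hglue, ih y ys hylen]
      rw [hrest, pvAdj_split t c y ys]
      simp only [List.flatMap_append, List.flatMap_cons, pvEmit_run t c hcls]
      have hemit : pvEmit ((c :: t).getLastD ' ', y) =
          (if pvCls ((c :: t).getLastD ' ') + pvCls y == 1 then ['*'] else []) ++ [y] := by
        unfold pvEmit
        rw [pvBoundary_eq_cls]
        cases hc : (pvCls ((c :: t).getLastD ' ') + pvCls y == 1) <;> simp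
      rw [hemit]
      simp

-- Core invariant of A: the fold over range(1, n+1) produces the head followed by
-- the emitted pieces of the first n adjacent pairs.
theorem pvLoop_eq (c : Char) (rest : List Char) (n : Nat) (hn : n ≤ rest.length) :
    (PySem.List.pyRange 1 (1 + (n : Int))).foldl
        (fun tmp i =>
          (if (PySem.Chars.isalpha (PySem.List.pyGetD (c :: rest) i ' ') &&
                PySem.Chars.isdigit (PySem.List.pyGetD (c :: rest) (i - 1) ' ')) ||
               (PySem.Chars.isdigit (PySem.List.pyGetD (c :: rest) i ' ') &&
                PySem.Chars.isalpha (PySem.List.pyGetD (c :: rest) (i - 1) ' '))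
            then tmp ++ ['*'] else tmp) ++ [PySem.List.pyGetD (c :: rest) i ' '])
        [c]
      = c :: ((((c :: rest).zip rest).take n).flatMap pvEmit) := by
  induction n with
  | zero => simp [PySem.List.pyRange]
  | succ n ih =>
    have hn' : n ≤ rest.length := Nat.le_of_succ_le hn
    have hlt : n < rest.length := hn
    have hz : n < ((c :: rest).zip rest).length := by
      simp [List.length_zip]; omega
    have hr : (1 : Int) ≤ 1 + (n : Int) := by omega
    have hsplit : PySem.List.pyRange 1 (1 + ((n + 1 : Nat) : Int)) =
        PySem.List.pyRange 1 (1 + (n : Int)) ++ [1 + (n : Int)] := by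
      have := PySem.List.pyRange_one_succ_right hr
      rw [show (1 : Int) + ((n + 1 : Nat) : Int) = (1 + (n : Int)) + 1 by push_cast; ring, this]
    rw [hsplit, List.foldl_append, ih hn']
    have hgets : PySem.List.pyGetD (c :: rest) (1 + (n : Int)) ' ' = rest.getD n ' ' := by
      have : (1 + (n : Int)) = ((n + 1 : Nat) : Int) := by push_cast; ring
      rw [this, PySem.List.pyGetD_natCast]; rfl
    have hgetp : PySem.List.pyGetD (c :: rest) ((1 + (n : Int)) - 1) ' ' = (c :: rest).getD n ' ' := by
      have : ((1 + (n : Int)) - 1) = ((n : Nat) : Int) := by ring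
      rw [this, PySem.List.pyGetD_natCast]
    have htake : (((c :: rest).zip rest).take (n + 1)) =
        (((c :: rest).zip rest).take n) ++ [((c :: rest)[n]'(by simp; omega), rest[n]'hlt)] := by
      rw [List.take_add_one]
      simp [List.getElem?_eq_getElem hz, List.getElem_zip]
    rw [htake]
    simp only [List.foldl_cons, List.foldl_nil, List.flatMap_append, List.flatMap_cons,
      List.flatMap_nil, List.append_nil, hgets, hgetp]
    have hgd1 : rest.getD n ' ' = rest[n]'hlt := by
      simp [List.getD_eq_getElem?_getD, List.getElem?_eq_getElem hlt]
    have hgd2 : (c :: rest).getD n ' ' = (c :: rest)[n]'(by simp; omega) := by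
      simp [List.getD_eq_getElem?_getD,
        List.getElem?_eq_getElem (show n < (c :: rest).length by simp; omega)]
    rw [hgd1, hgd2, pvCond_eq]
    unfold pvEmit
    split <;> simp

-- ===== VERDICT (by name: the statement is the Claim_ definition above) =====
theorem convert_spec : Claim_equal_convert := by
  intro inp _
  unfold Spec_convert convert convert_alt
  cases hcs : inp.toList with
  | nil =>
    simp [PySem.List.len, pvRuns, pvGlue]
    rw [show inp = String.ofList inp.toList from String.ofList_toList.symm, hcs]
  | cons c rest =>
    have hlen : PySem.List.len (c :: rest) = 1 + (rest.length : Int) := by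
      simp [PySem.List.len]; ring
    have hne : ¬ PySem.List.len (c :: rest) = 0 := by rw [hlen]; omega
    simp only [hne, if_false]
    rw [hlen, show PySem.List.pyGetD (c :: rest) 0 ' ' = c by simp [PySem.List.pyGetD],
        pvLoop_eq c rest rest.length (le_refl _)]
    have hzlen : ((c :: rest).zip rest).length = rest.length := by simp [List.length_zip]
    rw [← hzlen, List.take_length]
    rw [pvGlue_runs rest.length c rest (le_refl _)]
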